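-- pv_equiv track=rewrite | github.com/bischoff-m/puzzle-solver | src/puzzle_solver/grids.py | rotate_side_grid
-- ===== SOURCE A (Python) =====
-- from typing import TypeVar
--
-- T = TypeVar("T")
--
-- def rotate_grid_90_cw(grid: list[list[T]]) -> list[list[T]]:
--     h = len(grid)
--     w = len(grid[0])
--     return [[grid[h - 1 - y][x] for y in range(h)] for x in range(w)]
--
-- def rotate_side_grid(
--     grid: list[list[tuple[int, int, int, int]]], k_cw: int
-- ) -> list[list[tuple[int, int, int, int]]]:
--     k = k_cw % 4
--     out = grid
--     for _ in range(k):
--         # Rotate elements in the grid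
--         out = rotate_grid_90_cw(out)
--         # Rotate the (N, E, S, W) tuples: New N = Old W, New E = Old N, etc.
--         # (N, E, S, W) -> (W, N, E, S)
--         new_out = []
--         for row in out:
--             new_row = []
--             for n, e, s, w in row:
--                 new_row.append((w, n, e, s))
--             new_out.append(new_row)
--         out = new_out
--     return out
-- ===== SOURCE B (Python) =====
-- def rotate_side_grid(grid, k_cw):
--     k = k_cw % 4
--     if k == 0:
--         return grid
--     h = len(grid)
--     w = len(grid[0])
--     if k == 1:
--         return [[(lambda t: (t[3], t[0], t[1], t[2]))(grid[h - 1 - y][x])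
--                  for y in range(h)] for x in range(w)]
--     if k == 2:
--         return [[(lambda t: (t[2], t[3], t[0], t[1]))(grid[h - 1 - y][w - 1 - x])
--                  for x in range(w)] for y in range(h)]
--     return [[(lambda t: (t[1], t[2], t[3], t[0]))(grid[y][w - 1 - x])
--              for y in range(h)] for x in range(w)]
-- ===== Notes on version B (the rewrite author's own statement) =====
-- stated objective: alternative
-- what changed: B replaces A's k iterated full-grid 90-degree rotations (each rebuilding the whole grid and re-rotating every tuple) by a single nested comprehension using the closed-form coordinate map for a k-fold rotation and the k-shifted tuple order.
import Mathlib
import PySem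

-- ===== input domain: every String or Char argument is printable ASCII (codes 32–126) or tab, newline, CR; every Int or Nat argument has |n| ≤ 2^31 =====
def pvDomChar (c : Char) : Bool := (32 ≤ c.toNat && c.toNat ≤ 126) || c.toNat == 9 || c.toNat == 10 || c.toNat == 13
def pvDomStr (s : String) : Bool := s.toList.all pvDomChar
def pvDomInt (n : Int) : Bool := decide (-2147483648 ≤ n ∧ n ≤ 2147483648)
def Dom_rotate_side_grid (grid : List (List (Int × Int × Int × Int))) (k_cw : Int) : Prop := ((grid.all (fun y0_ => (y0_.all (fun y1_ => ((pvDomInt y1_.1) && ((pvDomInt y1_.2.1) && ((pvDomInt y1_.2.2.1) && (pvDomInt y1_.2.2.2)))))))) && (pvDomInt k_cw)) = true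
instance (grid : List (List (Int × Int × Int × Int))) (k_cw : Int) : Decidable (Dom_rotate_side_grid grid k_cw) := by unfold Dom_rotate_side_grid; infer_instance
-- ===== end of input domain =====

-- B replaces A's 1–3 iterated full-grid 90° rotations by one direct pass using the closed-form
-- coordinate map for k·90° and the k-shifted tuple order (objective: a single direct pass).

-- ===== PORT A =====
-- shared plumbing: double index with defaults; only evaluated in range under Pre_
def pvIdx (g : List (List (Int × Int × Int × Int))) (i j : Int) : Int × Int × Int × Int :=
  (PySem.List.pyGet? ((PySem.List.pyGet? g i).getD []) j).getD (0, 0, 0, 0)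

-- the tuple rotation done inside A's inner loop: (n, e, s, w) -> (w, n, e, s)
def pvRotNESW (t : Int × Int × Int × Int) : Int × Int × Int × Int :=
  match t with | (n, e, s, w) => (w, n, e, s)

def rotate_grid_90_cw (grid : List (List (Int × Int × Int × Int))) : List (List (Int × Int × Int × Int)) :=
  let h : Int := grid.length
  let w : Int := ((PySem.List.pyGet? grid 0).getD []).length
  (PySem.List.pyRange 0 w).map (fun x =>
    (PySem.List.pyRange 0 h).map (fun y => pvIdx grid (h - 1 - y) x))

def rotate_side_grid (grid : List (List (Int × Int × Int × Int))) (k_cw : Int) : List (List (Int × Int × Int × Int)) :=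
  let k := PySem.Int.mod k_cw 4
  (PySem.List.pyRange 0 k).foldl
    (fun out _ =>
      let out1 := rotate_grid_90_cw out
      out1.foldl (fun new_out row =>
        new_out ++ [row.foldl (fun new_row t => new_row ++ [pvRotNESW t]) []]) [])
    grid

-- ===== PORT B =====
def pvRot1 (t : Int × Int × Int × Int) : Int × Int × Int × Int := (t.2.2.2, t.1, t.2.1, t.2.2.1)
def pvRot2 (t : Int × Int × Int × Int) : Int × Int × Int × Int := (t.2.2.1, t.2.2.2, t.1, t.2.1)
def pvRot3 (t : Int × Int × Int × Int) : Int × Int × Int × Int := (t.2.1, t.2.2.1, t.2.2.2, t.1)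

def rotate_side_grid_alt (grid : List (List (Int × Int × Int × Int))) (k_cw : Int) : List (List (Int × Int × Int × Int)) :=
  let k := PySem.Int.mod k_cw 4
  if k = 0 then grid
  else
    let h : Int := grid.length
    let w : Int := ((PySem.List.pyGet? grid 0).getD []).length
    if k = 1 then
      (PySem.List.pyRange 0 w).map (fun x =>
        (PySem.List.pyRange 0 h).map (fun y => pvRot1 (pvIdx grid (h - 1 - y) x)))
    else if k = 2 then
      (PySem.List.pyRange 0 h).map (fun y =>
        (PySem.List.pyRange 0 w).map (fun x => pvRot2 (pvIdx grid (h - 1 - y) (w - 1 - x))))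
    else
      (PySem.List.pyRange 0 w).map (fun x =>
        (PySem.List.pyRange 0 h).map (fun y => pvRot3 (pvIdx grid y (w - 1 - x))))

-- ===== PRECONDITION & SPEC =====
-- Pre_ excludes exactly the inputs where the Python A raises IndexError: for k % 4 ≥ 1 it
-- indexes grid[0] (empty grid) and each row up to the first row's width (a shorter row), and
-- for k % 4 ≥ 2 the second rotation indexes row 0 of an empty intermediate (first row empty).
def Pre_rotate_side_grid (grid : List (List (Int × Int × Int × Int))) (k_cw : Int) : Prop :=
  PySem.Int.mod k_cw 4 = 0 ∨
    (grid ≠ [] ∧ (∀ row ∈ grid, (grid.headD []).length ≤ row.length) ∧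
      (PySem.Int.mod k_cw 4 = 1 ∨ grid.headD [] ≠ []))
instance (grid : List (List (Int × Int × Int × Int))) (k_cw : Int) : Decidable (Pre_rotate_side_grid grid k_cw) := by unfold Pre_rotate_side_grid; infer_instance

def pvWitness_rotate_side_grid : (List (List (Int × Int × Int × Int))) × Int :=
  ([[(1, 2, 3, 4), (5, 6, 7, 8)]], 3)

def Spec_rotate_side_grid (grid : List (List (Int × Int × Int × Int))) (k_cw : Int) (out : List (List (Int × Int × Int × Int))) : Prop := out = rotate_side_grid_alt grid k_cw
instance (grid : List (List (Int × Int × Int × Int))) (k_cw : Int) (out : List (List (Int × Int × Int × Int))) : Decidable (Spec_rotate_side_grid grid k_cw out) := by unfold Spec_rotate_side_grid; infer_instance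

-- ===== CLAIM (what is proved, stated in full; the proofs are below) =====
def Claim_equal_rotate_side_grid : Prop := ∀ (grid : List (List (Int × Int × Int × Int))) (k_cw : Int), Dom_rotate_side_grid grid k_cw → Pre_rotate_side_grid grid k_cw → Spec_rotate_side_grid grid k_cw (rotate_side_grid grid k_cw)

-- ===== LEMMAS AND PROOFS =====

-- canonical rectangular tabulation (proof-only)
def pvTab (m n : Nat) (f : Nat → Nat → Int × Int × Int × Int) : List (List (Int × Int × Int × Int)) :=
  (List.range m).map (fun i => (List.range n).map (fun j => f i j))

-- raw double index with Nat coordinates (proof-only)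
def pvEltN (g : List (List (Int × Int × Int × Int))) (i j : Nat) : Int × Int × Int × Int :=
  (g.getD i []).getD j (0, 0, 0, 0)

-- one iteration of A's loop, named for the proofs
def pvStepA (g : List (List (Int × Int × Int × Int))) : List (List (Int × Int × Int × Int)) :=
  let out1 := rotate_grid_90_cw g
  out1.foldl (fun new_out row =>
    new_out ++ [row.foldl (fun new_row t => new_row ++ [pvRotNESW t]) []]) []

theorem rotA_eq (grid : List (List (Int × Int × Int × Int))) (k_cw : Int) :
    rotate_side_grid grid k_cw
      = (PySem.List.pyRange 0 (PySem.Int.mod k_cw 4)).foldl (fun out _ => pvStepA out) grid := rfl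

theorem pvTab_congr {m n : Nat} {f g : Nat → Nat → Int × Int × Int × Int}
    (h : ∀ i < m, ∀ j < n, f i j = g i j) : pvTab m n f = pvTab m n g := by
  unfold pvTab
  refine List.map_congr_left (fun i hi => ?_)
  exact List.map_congr_left (fun j hj => h i (List.mem_range.mp hi) j (List.mem_range.mp hj))

theorem pvEltN_tab (m n : Nat) (f : Nat → Nat → Int × Int × Int × Int) {i j : Nat}
    (hi : i < m) (hj : j < n) : pvEltN (pvTab m n f) i j = f i j := by
  simp [pvEltN, pvTab, List.getD_eq_getElem?_getD, hi, hj]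

theorem pvIdx_eq_eltN (g : List (List (Int × Int × Int × Int))) (i j : Nat)
    (hi : i < g.length) (hj : j < (g.getD i []).length) :
    pvIdx g (i : Int) (j : Int) = pvEltN g i j := by
  have h1 : PySem.List.pyGet? g (i : Int) = some g[i] := by
    rw [PySem.List.pyGet?_eq_some_getElem g (by positivity) (by exact_mod_cast hi)]
    simp
  have h2 : g.getD i [] = g[i] := List.getD_eq_getElem g [] hi
  rw [h2] at hj
  have h3 : PySem.List.pyGet? g[i] (j : Int) = some g[i][j] := by
    rw [PySem.List.pyGet?_eq_some_getElem g[i] (by positivity) (by exact_mod_cast hj)]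
    simp
  unfold pvIdx pvEltN
  rw [h1, Option.getD_some, h3, Option.getD_some, h2, List.getD_eq_getElem _ _ hj]

-- a nested pyRange comprehension is a pvTab
theorem pyMap_eq_tab (m n : Nat) (F : Int → Int → Int × Int × Int × Int)
    (f : Nat → Nat → Int × Int × Int × Int)
    (hF : ∀ i < m, ∀ j < n, F (i : Int) (j : Int) = f i j) :
    (PySem.List.pyRange 0 (m : Int)).map (fun i => (PySem.List.pyRange 0 (n : Int)).map (fun j => F i j))
      = pvTab m n f := by
  simp only [PySem.List.pyRange_zero_natCast, List.map_map, pvTab, Function.comp_def]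
  refine List.map_congr_left (fun i hi => ?_)
  refine List.map_congr_left (fun j hj => ?_)
  exact hF i (List.mem_range.mp hi) j (List.mem_range.mp hj)

theorem stepA_map (g : List (List (Int × Int × Int × Int))) :
    pvStepA g = (rotate_grid_90_cw g).map (fun row => row.map pvRotNESW) := by
  unfold pvStepA
  rw [PySem.List.foldl_append_singleton_eq_map
        (fun row => row.foldl (fun new_row t => new_row ++ [pvRotNESW t]) []) (rotate_grid_90_cw g) []]
  simp only [List.nil_append]
  refine List.map_congr_left (fun row _ => ?_)
  simpa using PySem.List.foldl_append_singleton_eq_map pvRotNESW row []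

theorem stepA_raw (r : List (Int × Int × Int × Int)) (rs : List (List (Int × Int × Int × Int)))
    (hw : ∀ row ∈ r :: rs, r.length ≤ row.length) :
    pvStepA (r :: rs)
      = pvTab r.length (r :: rs).length
          (fun x y => pvRotNESW (pvEltN (r :: rs) ((r :: rs).length - 1 - y) x)) := by
  set g := r :: rs with hg
  have hhead : PySem.List.pyGet? g 0 = some r := PySem.List.pyGet?_zero_cons r rs
  rw [stepA_map]
  unfold rotate_grid_90_cw
  rw [hhead]
  simp only [Option.getD_some, List.map_map, Function.comp_def]
  refine pyMap_eq_tab r.length g.length _ _ (fun x hx y hy => ?_)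
  congr 1
  have hcast : ((g.length : Int) - 1 - (y : Int)) = ((g.length - 1 - y : Nat) : Int) := by omega
  rw [hcast]
  have hi : g.length - 1 - y < g.length := by omega
  have hrow : g.getD (g.length - 1 - y) [] = g[g.length - 1 - y] :=
    List.getD_eq_getElem g [] hi
  have hmem : g[g.length - 1 - y] ∈ g := List.getElem_mem hi
  exact pvIdx_eq_eltN g _ x hi (by rw [hrow]; exact lt_of_lt_of_le hx (hw _ hmem))

theorem stepA_tab (m n : Nat) (f : Nat → Nat → Int × Int × Int × Int) (hm : 0 < m) :
    pvStepA (pvTab m n f) = pvTab n m (fun x y => pvRotNESW (f (m - 1 - y) x)) := by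
  obtain ⟨r, rs, hcons⟩ : ∃ r rs, pvTab m n f = r :: rs := by
    cases h : pvTab m n f with
    | nil => exfalso; have := congrArg List.length h; simp [pvTab] at this; omega
    | cons a l => exact ⟨a, l, rfl⟩
  have hlen : (pvTab m n f).length = m := by simp [pvTab]
  have hrowlen : ∀ row ∈ pvTab m n f, row.length = n := by
    intro row hrow
    simp only [pvTab, List.mem_map] at hrow
    obtain ⟨i, _, rfl⟩ := hrow
    simp
  have hrlen : r.length = n := hrowlen r (by rw [hcons]; exact List.mem_cons_self)
  have := stepA_raw r rs (by
    intro row hrow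
    rw [hrlen, hrowlen row (by rw [hcons]; exact hrow)])
  rw [← hcons] at this
  rw [this, hrlen, hlen]
  refine pvTab_congr (fun x hx y hy => ?_)
  congr 1
  exact pvEltN_tab m n f (by omega) hx

theorem pvRot1_eq (t : Int × Int × Int × Int) : pvRotNESW t = pvRot1 t := by
  obtain ⟨a, b, c, d⟩ := t; rfl

theorem pvRot2_eq (t : Int × Int × Int × Int) : pvRotNESW (pvRotNESW t) = pvRot2 t := by
  obtain ⟨a, b, c, d⟩ := t; rfl

theorem pvRot3_eq (t : Int × Int × Int × Int) : pvRotNESW (pvRotNESW (pvRotNESW t)) = pvRot3 t := by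
  obtain ⟨a, b, c, d⟩ := t; rfl

-- B's branches as pvTab, under the in-range hypotheses
theorem altB_idx (r : List (Int × Int × Int × Int)) (rs : List (List (Int × Int × Int × Int)))
    (hw : ∀ row ∈ r :: rs, r.length ≤ row.length) {i j : Nat}
    (hi : i < (r :: rs).length) (hj : j < r.length) :
    pvIdx (r :: rs) (i : Int) (j : Int) = pvEltN (r :: rs) i j := by
  have hrow : (r :: rs).getD i [] = (r :: rs)[i] := List.getD_eq_getElem _ [] hi
  refine pvIdx_eq_eltN _ i j hi ?_
  rw [hrow]
  exact lt_of_lt_of_le hj (hw _ (List.getElem_mem hi))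

-- ===== VERDICT helper: the main equivalence =====
theorem rotate_side_grid_spec : Claim_equal_rotate_side_grid := by
  intro grid k_cw _ hpre
  unfold Spec_rotate_side_grid
  have h4 : PySem.Int.mod k_cw 4 = k_cw % 4 := PySem.Int.mod_eq_emod_of_pos (by norm_num)
  have hk0 : 0 ≤ PySem.Int.mod k_cw 4 := by rw [h4]; exact Int.emod_nonneg k_cw (by norm_num)
  have hk4 : PySem.Int.mod k_cw 4 < 4 := by rw [h4]; exact Int.emod_lt_of_pos k_cw (by norm_num)
  have hcases : PySem.Int.mod k_cw 4 = 0 ∨ PySem.Int.mod k_cw 4 = 1 ∨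
      PySem.Int.mod k_cw 4 = 2 ∨ PySem.Int.mod k_cw 4 = 3 := by omega
  rcases hcases with hk | hk | hk | hk
  · -- k = 0 : both return grid unchanged
    rw [rotA_eq, hk, PySem.List.pyRange_one_eq_nil (le_refl (0 : Int))]
    simp only [List.foldl_nil, rotate_side_grid_alt, hk, if_true]
  · -- k = 1
    rcases hpre with hpre0 | ⟨hne, hw, hlast⟩
    · omega
    obtain ⟨r, rs, rfl⟩ := List.exists_cons_of_ne_nil hne
    rw [rotA_eq, hk, show PySem.List.pyRange 0 1 = [0] by decide]
    simp only [List.foldl_cons, List.foldl_nil]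
    rw [stepA_raw r rs hw]
    simp only [rotate_side_grid_alt, hk, PySem.List.pyGet?_zero_cons, Option.getD_some, if_true]
    rw [if_neg (show ¬(1 : Int) = 0 by norm_num)]
    rw [pyMap_eq_tab r.length (r :: rs).length _
      (fun x y => pvRotNESW (pvEltN (r :: rs) ((r :: rs).length - 1 - y) x))
      (fun x hx y hy => by
        have hcast : (((r :: rs).length : Int) - 1 - (y : Int))
            = (((r :: rs).length - 1 - y : Nat) : Int) := by omega
        rw [hcast, altB_idx r rs hw (by omega) hx]
        exact (pvRot1_eq _).symm)]
  · -- k = 2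
    rcases hpre with hpre0 | ⟨hne, hw, hlast⟩
    · omega
    obtain ⟨r, rs, rfl⟩ := List.exists_cons_of_ne_nil hne
    have hwpos : 0 < r.length := by
      rcases hlast with h1 | h1
      · omega
      · simp only [List.headD_cons] at h1
        exact List.length_pos_iff.mpr h1
    rw [rotA_eq, hk, show PySem.List.pyRange 0 2 = [0, 1] by decide]
    simp only [List.foldl_cons, List.foldl_nil]
    rw [stepA_raw r rs hw, stepA_tab r.length (r :: rs).length _ hwpos]
    simp only [rotate_side_grid_alt, hk, PySem.List.pyGet?_zero_cons, Option.getD_some, if_true]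
    rw [if_neg (show ¬(2 : Int) = 0 by norm_num), if_neg (show ¬(2 : Int) = 1 by norm_num)]
    rw [pyMap_eq_tab (r :: rs).length r.length _
      (fun x y => pvRotNESW (pvRotNESW
        (pvEltN (r :: rs) ((r :: rs).length - 1 - x) (r.length - 1 - y))))
      (fun x hx y hy => by
        have hc1 : (((r :: rs).length : Int) - 1 - (x : Int))
            = (((r :: rs).length - 1 - x : Nat) : Int) := by omega
        have hc2 : ((r.length : Int) - 1 - (y : Int)) = ((r.length - 1 - y : Nat) : Int) := by
          omega
        rw [hc1, hc2, altB_idx r rs hw (by omega) (by omega)]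
        exact (pvRot2_eq _).symm)]
  · -- k = 3
    rcases hpre with hpre0 | ⟨hne, hw, hlast⟩
    · omega
    obtain ⟨r, rs, rfl⟩ := List.exists_cons_of_ne_nil hne
    have hwpos : 0 < r.length := by
      rcases hlast with h1 | h1
      · omega
      · simp only [List.headD_cons] at h1
        exact List.length_pos_iff.mpr h1
    have hhpos : 0 < (r :: rs).length := by simp
    rw [rotA_eq, hk, show PySem.List.pyRange 0 3 = [0, 1, 2] by decide]
    simp only [List.foldl_cons, List.foldl_nil]
    rw [stepA_raw r rs hw, stepA_tab r.length (r :: rs).length _ hwpos,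
        stepA_tab (r :: rs).length r.length _ hhpos]
    simp only [rotate_side_grid_alt, hk, PySem.List.pyGet?_zero_cons, Option.getD_some, if_true]
    rw [if_neg (show ¬(3 : Int) = 0 by norm_num), if_neg (show ¬(3 : Int) = 1 by norm_num),
        if_neg (show ¬(3 : Int) = 2 by norm_num)]
    rw [pyMap_eq_tab r.length (r :: rs).length _
      (fun x y => pvRot3 (pvEltN (r :: rs) y (r.length - 1 - x)))
      (fun x hx y hy => by
        have hc2 : ((r.length : Int) - 1 - (x : Int)) = ((r.length - 1 - x : Nat) : Int) := by
          omega
        rw [hc2, altB_idx r rs hw hy (by omega)])]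
    refine pvTab_congr (fun x hx y hy => ?_)
    rw [show (r :: rs).length - 1 - ((r :: rs).length - 1 - y) = y by omega]
    exact pvRot3_eq _
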